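-- pv_equiv track=rewrite | github.com/light-src/AlgoForTest | Programmers/190823[3차]방금그곡/tyl.py | solution
-- ===== SOURCE A (Python) =====
-- from functools import cmp_to_key
--
-- def compare(x,y):
--     if x[0] < y[0] : return 1
--     elif x[0] > y[0] : return -1
--     else:
--         if x[1] < y[1] : return -1
--         elif x[1] > y[1] : return 1
--         else: return 0
--
-- def change_shap(check):
--     notes = ''
--     for i in range(len(check)-1):
--         if check[i] == '#' : continue
--         if check[i+1] == '#' : notes += check[i].lower(); continue
--         notes += check[i]
--     if check[-1] != '#': notes += check[-1]
--     return notes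
--
-- def solution(m, musicinfos):
--     musics, answers = [], []
--     m = change_shap(list(m))
--     for i, music in enumerate(musicinfos):
--         start, end, notes = music[0:5], music[6:11], music[12:]
--         name, notes = notes.split(',')
--         start = int(start[0:2])*60 + int(start[3:])
--         end = int(end[0:2])*60 + int(end[3:])
--         notes = change_shap(list(notes))
--
--         tmp = notes
--         notes = ''
--         for i in range(end-start):
--             notes += tmp[i%len(tmp)]
--         musics.append([end-start, i, name, notes])
--
--     for music in musics:
--         if music[3].find(m) != -1:
--             answers.append(music)
--     if answers == []:
--         return '(None)'
--     answers = sorted(answers, key=cmp_to_key(compare))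
--     return answers[0][2]
-- ===== SOURCE B (Python) =====
-- def _flatten(s):
--     out = []
--     n = len(s)
--     for i in range(n):
--         c = s[i]
--         if c == '#':
--             continue
--         if i + 1 < n and s[i+1] == '#':
--             out.append(c.lower())
--         else:
--             out.append(c)
--     return ''.join(out)
--
--
-- def solution(m, musicinfos):
--     target = _flatten(m)
--     best_name, best_dur = '(None)', None
--     for music in musicinfos:
--         start, end, rest = music[0:5], music[6:11], music[12:]
--         name, notes = rest.split(',')
--         start = int(start[0:2]) * 60 + int(start[3:])
--         end = int(end[0:2]) * 60 + int(end[3:])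
--         dur = end - start
--         core = _flatten(notes)
--         melody = (core * dur)[:dur] if dur > 0 else ''
--         if target in melody and (best_dur is None or dur > best_dur):
--             best_name, best_dur = name, dur
--     return best_name
-- ===== Notes on version B (the rewrite author's own statement) =====
-- stated objective: simpler
-- what changed: B replaces A's collect-all-matches / cmp_to_key comparator sort / take-first tail with a single linear best-so-far scan (updating only on strictly greater duration, which preserves the earliest-index tie-break), builds each repeated melody by slicing a repetition of the flattened core instead of A's character-by-character modulo loop, and flattens '#'-notes with one uniform lookahead loop instead of A's split loop-plus-last-char special case.
import Mathlib
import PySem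

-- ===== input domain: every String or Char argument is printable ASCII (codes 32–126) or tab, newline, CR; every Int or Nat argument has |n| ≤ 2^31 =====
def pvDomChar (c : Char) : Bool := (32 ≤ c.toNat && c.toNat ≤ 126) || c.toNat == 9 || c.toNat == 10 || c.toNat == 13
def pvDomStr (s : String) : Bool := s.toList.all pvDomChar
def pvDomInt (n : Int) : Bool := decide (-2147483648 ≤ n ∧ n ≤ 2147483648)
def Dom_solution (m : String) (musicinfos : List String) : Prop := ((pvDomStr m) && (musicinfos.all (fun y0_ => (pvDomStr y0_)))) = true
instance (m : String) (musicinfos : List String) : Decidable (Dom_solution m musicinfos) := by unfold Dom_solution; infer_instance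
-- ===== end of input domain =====

-- B replaces A's collect-all/comparator-sort tail by a single best-so-far scan and builds each
-- repeated melody by slicing a repetition of the core instead of a char-by-char modulo loop (objective: simpler).

-- ===== PORT A =====
-- functools.cmp_to_key(compare): Python's stable sort under this comparator is modelled exactly by a
-- stable insertion sort (PySem.List.insertBy) inserting each element after all elements it does not
-- strictly precede; exact here because `compare` is a total preorder (lexicographic on (-x0, x1)).
def pyCompare (x y : Int × Int × String × List Char) : Int :=
  if x.1 < y.1 then 1
  else if x.1 > y.1 then -1
  else if x.2.1 < y.2.1 then -1
  else if x.2.1 > y.2.1 then 1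
  else 0

def changeShap (check : List Char) : List Char :=
  let notes := (PySem.List.pyRange 0 (PySem.List.len check - 1) 1).foldl (fun acc i =>
    if PySem.List.pyGetD check i ' ' = '#' then acc
    else if PySem.List.pyGetD check (i + 1) ' ' = '#' then acc ++ [PySem.Chars.lowerChar (PySem.List.pyGetD check i ' ')]
    else acc ++ [PySem.List.pyGetD check i ' ']) []
  if PySem.List.pyGetD check (-1) '#' ≠ '#' then notes ++ [PySem.List.pyGetD check (-1) '#'] else notes

def solution (m : String) (musicinfos : List String) : String :=
  let m' := changeShap m.toList
  let musics := (PySem.List.enumerate musicinfos).foldl (fun musics im =>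
    let i := im.1
    let music := im.2
    let startS := PySem.Str.slice music (some 0) (some 5)
    let endS := PySem.Str.slice music (some 6) (some 11)
    let notesS := PySem.Str.slice music (some 12) none
    let parts := (PySem.Str.split? notesS ",").getD []
    let name := parts.getD 0 ""
    let notes0 := parts.getD 1 ""
    let start := (PySem.Int.ofStr? (PySem.Str.slice startS (some 0) (some 2))).getD 0 * 60
                 + (PySem.Int.ofStr? (PySem.Str.slice startS (some 3) none)).getD 0
    let endT := (PySem.Int.ofStr? (PySem.Str.slice endS (some 0) (some 2))).getD 0 * 60
                 + (PySem.Int.ofStr? (PySem.Str.slice endS (some 3) none)).getD 0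
    let tmp := changeShap notes0.toList
    let st := (PySem.List.pyRange 0 (endT - start) 1).foldl
        (fun (st : List Char × Int) j =>
          (st.1 ++ [PySem.List.pyGetD tmp (PySem.Int.mod j (PySem.List.len tmp)) ' '], j)) ([], i)
    musics ++ [(endT - start, st.2, name, st.1)]) []
  let answers := musics.foldl (fun acc mu =>
    if PySem.Chars.find mu.2.2.2 m' ≠ -1 then acc ++ [mu] else acc) []
  if answers = [] then "(None)"
  else ((answers.foldl (fun acc x =>
          PySem.List.insertBy (fun a b => decide (pyCompare a b < 0)) x acc) []).headD
          (0, 0, "", [])).2.2.1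

-- ===== PORT B =====
def flattenNotes (s : List Char) : List Char :=
  (PySem.List.pyRange 0 (PySem.List.len s) 1).foldl (fun acc i =>
    if PySem.List.pyGetD s i ' ' = '#' then acc
    else if i + 1 < PySem.List.len s ∧ PySem.List.pyGetD s (i + 1) ' ' = '#'
      then acc ++ [PySem.Chars.lowerChar (PySem.List.pyGetD s i ' ')]
    else acc ++ [PySem.List.pyGetD s i ' ']) []

def solution_alt (m : String) (musicinfos : List String) : String :=
  let target := flattenNotes m.toList
  (musicinfos.foldl (fun (best : String × Option Int) music =>
    let startS := PySem.Str.slice music (some 0) (some 5)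
    let endS := PySem.Str.slice music (some 6) (some 11)
    let notesS := PySem.Str.slice music (some 12) none
    let parts := (PySem.Str.split? notesS ",").getD []
    let name := parts.getD 0 ""
    let notes0 := parts.getD 1 ""
    let start := (PySem.Int.ofStr? (PySem.Str.slice startS (some 0) (some 2))).getD 0 * 60
                 + (PySem.Int.ofStr? (PySem.Str.slice startS (some 3) none)).getD 0
    let endT := (PySem.Int.ofStr? (PySem.Str.slice endS (some 0) (some 2))).getD 0 * 60
                 + (PySem.Int.ofStr? (PySem.Str.slice endS (some 3) none)).getD 0
    let dur := endT - start
    let core := flattenNotes notes0.toList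
    let melody : List Char := if dur > 0 then List.take dur.toNat (PySem.List.pyRepeat core dur) else []
    if PySem.Chars.isIn target melody
        && (match best.2 with | none => true | some d => decide (dur > d))
    then (name, some dur) else best) ("(None)", none)).1

-- ===== PRECONDITION & SPEC =====
-- Pre_solution excludes exactly the inputs on which the Python A raises: an empty m (IndexError in
-- change_shap), an entry whose tail does not split at ',' into exactly two pieces (ValueError),
-- a time field int() cannot parse (ValueError), an empty notes field (IndexError), and a positive
-- duration with an all-'#' notes field (ZeroDivisionError).
def Pre_solution (m : String) (musicinfos : List String) : Prop :=
  m ≠ "" ∧ (musicinfos.all (fun music =>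
    let parts := (PySem.Str.split? (PySem.Str.slice music (some 12) none) ",").getD []
    let s0 := PySem.Int.ofStr? (PySem.Str.slice (PySem.Str.slice music (some 0) (some 5)) (some 0) (some 2))
    let s1 := PySem.Int.ofStr? (PySem.Str.slice (PySem.Str.slice music (some 0) (some 5)) (some 3) none)
    let e0 := PySem.Int.ofStr? (PySem.Str.slice (PySem.Str.slice music (some 6) (some 11)) (some 0) (some 2))
    let e1 := PySem.Int.ofStr? (PySem.Str.slice (PySem.Str.slice music (some 6) (some 11)) (some 3) none)
    parts.length == 2 && s0.isSome && s1.isSome && e0.isSome && e1.isSome &&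
      !(parts.getD 1 "").toList.isEmpty &&
      (decide ((e0.getD 0 * 60 + e1.getD 0) - (s0.getD 0 * 60 + s1.getD 0) ≤ 0)
        || (parts.getD 1 "").toList.any (fun c => c ≠ '#'))) = true)
instance (m : String) (musicinfos : List String) : Decidable (Pre_solution m musicinfos) := by
  unfold Pre_solution; infer_instance

def pvWitness_solution : String × List String := ("ABC", ["12:00,12:14,HELLO,ABC"])

def Spec_solution (m : String) (musicinfos : List String) (out : String) : Prop := out = solution_alt m musicinfos
instance (m : String) (musicinfos : List String) (out : String) : Decidable (Spec_solution m musicinfos out) := by unfold Spec_solution; infer_instance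

-- ===== CLAIM (what is proved, stated in full; the proofs are below) =====
def Claim_equal_solution : Prop := ∀ (m : String) (musicinfos : List String), Dom_solution m musicinfos → Pre_solution m musicinfos → Spec_solution m musicinfos (solution m musicinfos)

-- ===== LEMMAS AND PROOFS =====

abbrev pvE : Type := Int × Int × String × List Char

-- per-index contribution of A's change_shap main loop (no lookahead guard: the loop stops at len-1)
def gA (s : List Char) (i : Int) : List Char :=
  if PySem.List.pyGetD s i ' ' = '#' then []
  else if PySem.List.pyGetD s (i + 1) ' ' = '#' then [PySem.Chars.lowerChar (PySem.List.pyGetD s i ' ')]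
  else [PySem.List.pyGetD s i ' ']

-- per-index contribution of B's _flatten loop (guarded lookahead, runs over all indices)
def gB (s : List Char) (i : Int) : List Char :=
  if PySem.List.pyGetD s i ' ' = '#' then []
  else if i + 1 < PySem.List.len s ∧ PySem.List.pyGetD s (i + 1) ' ' = '#'
    then [PySem.Chars.lowerChar (PySem.List.pyGetD s i ' ')]
  else [PySem.List.pyGetD s i ' ']

lemma changeShap_eq_flatMap (s : List Char) :
    changeShap s = (PySem.List.pyRange 0 (PySem.List.len s - 1) 1).flatMap (gA s)
      ++ (if PySem.List.pyGetD s (-1) '#' ≠ '#' then [PySem.List.pyGetD s (-1) '#'] else []) := by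
  have hb : (fun (acc : List Char) i =>
      if PySem.List.pyGetD s i ' ' = '#' then acc
      else if PySem.List.pyGetD s (i + 1) ' ' = '#' then acc ++ [PySem.Chars.lowerChar (PySem.List.pyGetD s i ' ')]
      else acc ++ [PySem.List.pyGetD s i ' ']) = fun acc i => acc ++ gA s i := by
    funext acc i
    unfold gA
    split_ifs <;> simp
  unfold changeShap
  rw [hb, PySem.List.foldl_append_eq_flatMap]
  split_ifs <;> simp

lemma flattenNotes_eq_flatMap (s : List Char) :
    flattenNotes s = (PySem.List.pyRange 0 (PySem.List.len s) 1).flatMap (gB s) := by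
  have hb : (fun (acc : List Char) i =>
      if PySem.List.pyGetD s i ' ' = '#' then acc
      else if i + 1 < PySem.List.len s ∧ PySem.List.pyGetD s (i + 1) ' ' = '#'
        then acc ++ [PySem.Chars.lowerChar (PySem.List.pyGetD s i ' ')]
      else acc ++ [PySem.List.pyGetD s i ' ']) = fun acc i => acc ++ gB s i := by
    funext acc i
    unfold gB
    split_ifs <;> simp_all
  unfold flattenNotes
  rw [hb, PySem.List.foldl_append_eq_flatMap]
  simp

lemma flattenNotes_eq_changeShap (s : List Char) (h : s ≠ []) : flattenNotes s = changeShap s := by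
  have hn : 0 < s.length := List.length_pos_of_ne_nil h
  rw [flattenNotes_eq_flatMap, changeShap_eq_flatMap]
  have hsplit : PySem.List.pyRange 0 (PySem.List.len s) 1
      = PySem.List.pyRange 0 (PySem.List.len s - 1) 1 ++ [PySem.List.len s - 1] := by
    have h1 : PySem.List.len s = (PySem.List.len s - 1) + 1 := by omega
    rw [h1, PySem.List.pyRange_one_succ_right (by simp [PySem.List.len_eq]; omega)]
    simp
  rw [hsplit, List.flatMap_append]
  have hmain : (PySem.List.pyRange 0 (PySem.List.len s - 1) 1).flatMap (gB s)
      = (PySem.List.pyRange 0 (PySem.List.len s - 1) 1).flatMap (gA s) := by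
    rw [List.flatMap_def, List.flatMap_def]
    congr 1
    apply List.map_congr_left
    intro i hi
    rw [PySem.List.mem_pyRange_one] at hi
    unfold gA gB
    have hlt : i + 1 < PySem.List.len s := by simp [PySem.List.len_eq] at hi ⊢; omega
    by_cases h0 : PySem.List.pyGetD s i ' ' = '#'
    · simp [h0]
    · rw [if_neg h0, if_neg h0]
      by_cases h1 : PySem.List.pyGetD s (i + 1) ' ' = '#'
      · rw [if_pos h1, if_pos ⟨hlt, h1⟩]
      · rw [if_neg h1, if_neg (fun hc => h1 hc.2)]
  have hlast : PySem.List.pyGetD s (-1) '#' = s.getLast h := PySem.List.pyGetD_neg_one s '#' h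
  have hlast2 : PySem.List.pyGetD s (PySem.List.len s - 1) ' ' = s.getLast h := by
    have hcast : PySem.List.len s - 1 = ((s.length - 1 : Nat) : Int) := by
      simp [PySem.List.len_eq]; omega
    rw [hcast, PySem.List.pyGetD_natCast, List.getD_eq_getElem s ' ' (by omega),
      List.getLast_eq_getElem]
  have htail : (gB s) (PySem.List.len s - 1) = (if PySem.List.pyGetD s (-1) '#' ≠ '#'
      then [PySem.List.pyGetD s (-1) '#'] else []) := by
    unfold gB
    rw [hlast, hlast2]
    have hnot : ¬ (PySem.List.len s - 1 + 1 < PySem.List.len s ∧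
        PySem.List.pyGetD s (PySem.List.len s - 1 + 1) ' ' = '#') := by
      rintro ⟨hc, -⟩; omega
    by_cases hx : s.getLast h = '#'
    · simp [hx]
    · simp [hx]
  rw [hmain]
  simp only [List.flatMap_cons, List.flatMap_nil, List.append_nil]
  rw [htail]

lemma flattenNotes_ne_nil (s : List Char) (c : Char) (hc : c ∈ s) (hne : c ≠ '#') :
    flattenNotes s ≠ [] := by
  rw [flattenNotes_eq_flatMap]
  obtain ⟨j, hj, hget⟩ := List.mem_iff_getElem.mp hc
  intro hemp
  rw [List.flatMap_eq_nil_iff] at hemp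
  have hmem : (j : Int) ∈ PySem.List.pyRange 0 (PySem.List.len s) 1 := by
    rw [PySem.List.mem_pyRange_one]
    simp [PySem.List.len_eq]; omega
  have := hemp _ hmem
  unfold gB at this
  rw [PySem.List.pyGetD_natCast, List.getD_eq_getElem s ' ' hj, hget] at this
  simp [hne] at this
  split at this <;> simp_all

-- parsed fields of one musicinfo entry (proof-side characterisations)
def pParts (music : String) : List String :=
  (PySem.Str.split? (PySem.Str.slice music (some 12) none) ",").getD []
def pName (music : String) : String := (pParts music).getD 0 ""
def pNotes (music : String) : String := (pParts music).getD 1 ""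
def pDur (music : String) : Int :=
  ((PySem.Int.ofStr? (PySem.Str.slice (PySem.Str.slice music (some 6) (some 11)) (some 0) (some 2))).getD 0 * 60
    + (PySem.Int.ofStr? (PySem.Str.slice (PySem.Str.slice music (some 6) (some 11)) (some 3) none)).getD 0)
  - ((PySem.Int.ofStr? (PySem.Str.slice (PySem.Str.slice music (some 0) (some 5)) (some 0) (some 2))).getD 0 * 60
    + (PySem.Int.ofStr? (PySem.Str.slice (PySem.Str.slice music (some 0) (some 5)) (some 3) none)).getD 0)
def pCore (music : String) : List Char := changeShap (pNotes music).toList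
def pMel (music : String) : List Char :=
  (PySem.List.pyRange 0 (pDur music) 1).map
    (fun j => PySem.List.pyGetD (pCore music) (PySem.Int.mod j (PySem.List.len (pCore music))) ' ')
def entryOf (i : Int) (music : String) : pvE :=
  (pDur music, if 0 < pDur music then pDur music - 1 else i, pName music, pMel music)

-- the per-music conjunct of Pre_solution
def PreM (music : String) : Prop :=
  (pParts music).length = 2 ∧ (pNotes music).toList ≠ [] ∧
  (pDur music ≤ 0 ∨ ∃ c ∈ (pNotes music).toList, c ≠ '#')

lemma pre_musics {m : String} {musicinfos : List String} (h : Pre_solution m musicinfos) :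
    m.toList ≠ [] ∧ ∀ mu ∈ musicinfos, PreM mu := by
  obtain ⟨hm, hall⟩ := h
  constructor
  · simpa using hm
  · rw [List.all_eq_true] at hall
    intro mu hmu
    have := hall mu hmu
    simp only [Bool.and_eq_true, Bool.or_eq_true, beq_iff_eq, decide_eq_true_eq,
      Bool.not_eq_true', List.isEmpty_eq_false_iff, List.any_eq_true] at this
    refine ⟨this.1.1.1.1.1.1, this.1.2, ?_⟩
    rcases this.2 with h1 | h2
    · left
      exact h1
    · right
      obtain ⟨c, hc1, hc2⟩ := h2
      exact ⟨c, hc1, by simpa using hc2⟩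

-- A's inner repeat loop: last value of the loop variable
lemma foldl_snd_last (l : List Int) (a : Int) : l.foldl (fun _ j => j) a = l.getLastD a := by
  induction l generalizing a with
  | nil => rfl
  | cons b t ih =>
    rw [List.foldl_cons]
    show List.foldl (fun _ j => j) b t = (b :: t).getLastD a
    rw [ih, List.getLastD_cons]

lemma pyRange_getLastD (d a : Int) (hd : 0 < d) : (PySem.List.pyRange 0 d 1).getLastD a = d - 1 := by
  have h : d = (d - 1) + 1 := by omega
  rw [h, PySem.List.pyRange_one_succ_right (by omega)]
  simp

-- B's sliced repetition equals A's modulo-indexed melody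
lemma take_pyRepeat_eq_pMel (core : List Char) (hc : core ≠ []) (d : Int) (_hd : 0 < d) :
    List.take d.toNat (PySem.List.pyRepeat core d)
      = (PySem.List.pyRange 0 d 1).map
          (fun j => PySem.List.pyGetD core (PySem.Int.mod j (PySem.List.len core)) ' ') := by
  have hlen : 0 < core.length := List.length_pos_of_ne_nil hc
  have hrep : ∀ (k i : Nat), i < k * core.length →
      ((List.replicate k core).flatten)[i]? = some (core.getD (i % core.length) ' ') := by
    intro k
    induction k with
    | zero => intro i hi; omega
    | succ k ih =>
      intro i hi
      rw [List.replicate_succ, List.flatten_cons]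
      by_cases hil : i < core.length
      · rw [List.getElem?_append_left hil, Nat.mod_eq_of_lt hil,
          List.getElem?_eq_getElem hil, List.getD_eq_getElem core ' ' hil]
      · rw [Nat.not_lt] at hil
        have hexp : (k + 1) * core.length = k * core.length + core.length := Nat.succ_mul _ _
        rw [List.getElem?_append_right hil, ih (i - core.length) (by omega),
          ← Nat.mod_eq_sub_mod hil]
  apply List.ext_getElem?
  intro i
  by_cases hi : i < d.toNat
  · rw [List.getElem?_take_of_lt hi]
    unfold PySem.List.pyRepeat
    have hbound : i < d.toNat * core.length := by
      have := Nat.le_mul_of_pos_right d.toNat hlen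
      omega
    rw [hrep d.toNat i hbound, PySem.List.pyRange_one, List.map_map, List.getElem?_map,
      List.getElem?_range (by simpa using hi)]
    simp only [Option.map_some, Function.comp_apply, zero_add]
    rw [show PySem.Int.mod (i : Int) (PySem.List.len core) = ((i % core.length : Nat) : Int) from by
      simp [PySem.List.len_eq, PySem.Int.mod_natCast], PySem.List.pyGetD_natCast]
  · have h1 : (List.take d.toNat (PySem.List.pyRepeat core d)).length ≤ d.toNat := by
      simp [List.length_take]
    have h2 : ((PySem.List.pyRange 0 d 1).map
        (fun j => PySem.List.pyGetD core (PySem.Int.mod j (PySem.List.len core)) ' ')).length = d.toNat := by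
      simp [PySem.List.length_pyRange_one]
    rw [List.getElem?_eq_none (by omega), List.getElem?_eq_none (by omega)]

-- A's per-entry value, written exactly as the fold body of port A builds it
def aEntry (im : Int × String) : pvE :=
  let i := im.1
  let music := im.2
  let startS := PySem.Str.slice music (some 0) (some 5)
  let endS := PySem.Str.slice music (some 6) (some 11)
  let notesS := PySem.Str.slice music (some 12) none
  let parts := (PySem.Str.split? notesS ",").getD []
  let name := parts.getD 0 ""
  let notes0 := parts.getD 1 ""
  let start := (PySem.Int.ofStr? (PySem.Str.slice startS (some 0) (some 2))).getD 0 * 60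
               + (PySem.Int.ofStr? (PySem.Str.slice startS (some 3) none)).getD 0
  let endT := (PySem.Int.ofStr? (PySem.Str.slice endS (some 0) (some 2))).getD 0 * 60
               + (PySem.Int.ofStr? (PySem.Str.slice endS (some 3) none)).getD 0
  let tmp := changeShap notes0.toList
  let st := (PySem.List.pyRange 0 (endT - start) 1).foldl
      (fun (st : List Char × Int) j =>
        (st.1 ++ [PySem.List.pyGetD tmp (PySem.Int.mod j (PySem.List.len tmp)) ' '], j)) ([], i)
  (endT - start, st.2, name, st.1)

lemma melFold (tmp : List Char) (d i : Int) :
    ((PySem.List.pyRange 0 d 1).foldl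
      (fun (st : List Char × Int) j =>
        (st.1 ++ [PySem.List.pyGetD tmp (PySem.Int.mod j (PySem.List.len tmp)) ' '], j)) ([], i))
    = ((PySem.List.pyRange 0 d 1).map
        (fun j => PySem.List.pyGetD tmp (PySem.Int.mod j (PySem.List.len tmp)) ' '),
       if 0 < d then d - 1 else i) := by
  rw [PySem.List.foldl_prod_mk
    (f := fun (acc : List Char) j =>
      acc ++ [PySem.List.pyGetD tmp (PySem.Int.mod j (PySem.List.len tmp)) ' '])
    (g := fun (_ : Int) j => j)]
  rw [PySem.List.foldl_append_singleton_eq_map, foldl_snd_last]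
  by_cases hd : 0 < d
  · rw [if_pos hd, pyRange_getLastD _ _ hd]
    simp
  · rw [if_neg hd, PySem.List.pyRange_one_eq_nil (by omega)]
    simp

def mf (mu : String) (i : Int) : List Char × Int :=
  (PySem.List.pyRange 0 (pDur mu) 1).foldl
    (fun (st : List Char × Int) j =>
      (st.1 ++ [PySem.List.pyGetD (pCore mu) (PySem.Int.mod j (PySem.List.len (pCore mu))) ' '], j)) ([], i)

lemma aEntry_unfold (i : Int) (mu : String) :
    aEntry (i, mu) = (pDur mu, (mf mu i).2, pName mu, (mf mu i).1) := rfl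

lemma entryOf_unfold (i : Int) (mu : String) :
    entryOf i mu = (pDur mu, if 0 < pDur mu then pDur mu - 1 else i, pName mu, pMel mu) := rfl

lemma mf_eq (mu : String) (i : Int) :
    mf mu i = (pMel mu, if 0 < pDur mu then pDur mu - 1 else i) :=
  melFold (pCore mu) (pDur mu) i

lemma aEntry_eq (im : Int × String) : aEntry im = entryOf im.1 im.2 := by
  obtain ⟨i, mu⟩ := im
  have hmid : ((pDur mu, (mf mu i).2, pName mu, (mf mu i).1) : pvE)
      = (pDur mu, if 0 < pDur mu then pDur mu - 1 else i, pName mu, pMel mu) := by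
    rw [mf_eq]
  exact (aEntry_unfold i mu).trans (hmid.trans (entryOf_unfold i mu).symm)

-- the best-so-far update on a parsed entry (what B's loop does to its state on a matching entry)
def stepE (target : List Char) (st : String × Option Int) : pvE → String × Option Int
  | (dur, _, name, mel) =>
    if PySem.Chars.isIn target mel
        && (match st.2 with | none => true | some d => decide (dur > d))
    then (name, some dur) else st

lemma stepE_apply (target : List Char) (st : String × Option Int) (dur idx : Int)
    (name : String) (mel : List Char) :
    stepE target st (dur, idx, name, mel)
      = if PySem.Chars.isIn target mel
            && (match st.2 with | none => true | some d => decide (dur > d))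
        then (name, some dur) else st := rfl

def step2 (st : String × Option Int) (e : pvE) : String × Option Int :=
  if (match st.2 with | none => true | some d => decide (e.1 > d))
  then (e.2.2.1, some e.1) else st

def bestE (l : List pvE) : Option pvE :=
  l.foldl (fun o e => match o with | none => some e | some b => if e.1 > b.1 then some e else o) none

lemma bestE_append (l : List pvE) (x : pvE) :
    bestE (l ++ [x]) = match bestE l with
      | none => some x
      | some b => if x.1 > b.1 then some x else some b := by
  unfold bestE
  rw [List.foldl_append]
  cases hb : List.foldl (fun o e => match o with | none => some e | some b => if e.1 > b.1 then some e else o)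
      (none : Option pvE) l <;> simp [List.foldl]

lemma bestE_mem {l : List pvE} {b : pvE} (h : bestE l = some b) : b ∈ l := by
  induction l using List.reverseRecOn with
  | nil => simp [bestE] at h
  | append_singleton l x ih =>
    rw [bestE_append] at h
    cases hb : bestE l with
    | none =>
      rw [hb] at h
      dsimp only at h
      simp at h
      simp [h]
    | some b' =>
      rw [hb] at h
      dsimp only at h
      by_cases hgt : x.1 > b'.1
      · rw [if_pos hgt] at h
        simp at h
        simp [h]
      · rw [if_neg hgt] at h
        simp at h
        subst h
        exact List.mem_append_left _ (ih hb)

lemma bestE_none_iff (l : List pvE) : bestE l = none ↔ l = [] := by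
  induction l using List.reverseRecOn with
  | nil => simp [bestE]
  | append_singleton l x ih =>
    rw [bestE_append]
    cases bestE l
    · simp
    · simp
      split <;> simp

lemma scan2_eq (l : List pvE) :
    l.foldl step2 ("(None)", none)
      = match bestE l with
        | none => (("(None)" : String), (none : Option Int))
        | some b => (b.2.2.1, some b.1) := by
  induction l using List.reverseRecOn with
  | nil => rfl
  | append_singleton l x ih =>
    rw [List.foldl_append, ih, bestE_append]
    cases hb : bestE l with
    | none => rfl
    | some b =>
      dsimp only
      by_cases hgt : x.1 > b.1
      · simp [step2, hgt]
      · simp [step2, hgt]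

-- the tie-order invariant of A's entry list: equal durations never see a smaller second key later
def pvP (a b : pvE) : Prop := a.1 = b.1 → a.2.1 ≤ b.2.1

lemma cmpLt_iff (x b : pvE) :
    (pyCompare x b < 0) ↔ (b.1 < x.1 ∨ (x.1 = b.1 ∧ x.2.1 < b.2.1)) := by
  unfold pyCompare
  split_ifs <;> omega

def sortFold (l : List pvE) : List pvE :=
  l.foldl (fun acc x => PySem.List.insertBy (fun a b => decide (pyCompare a b < 0)) x acc) []

lemma sorted_head (l : List pvE) : l.Pairwise pvP → (sortFold l).head? = bestE l := by
  unfold sortFold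
  induction l using List.reverseRecOn with
  | nil => intro _; rfl
  | append_singleton l x ih =>
    intro hp
    rw [List.pairwise_append] at hp
    obtain ⟨hpl, -, hlast⟩ := hp
    rw [List.foldl_append, bestE_append]
    simp only [List.foldl_cons, List.foldl_nil]
    cases hb : bestE l with
    | none =>
      have hl : l = [] := (bestE_none_iff l).mp hb
      subst hl
      rfl
    | some b =>
      have hh := ih hpl
      rw [hb] at hh
      obtain ⟨rest, hsort⟩ : ∃ rest, List.foldl
          (fun acc x => PySem.List.insertBy (fun a b => decide (pyCompare a b < 0)) x acc) [] l
            = b :: rest := by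
        cases hsl : List.foldl
            (fun acc x => PySem.List.insertBy (fun a b => decide (pyCompare a b < 0)) x acc) [] l with
        | nil => rw [hsl] at hh; simp at hh
        | cons hd rest =>
          rw [hsl] at hh
          simp at hh
          exact ⟨rest, by rw [hh]⟩
      rw [hsort]
      dsimp only
      have hPbx : pvP b x := hlast b (bestE_mem hb) x (by simp)
      have hiff : pyCompare x b < 0 ↔ b.1 < x.1 := by
        rw [cmpLt_iff]
        constructor
        · rintro (h | ⟨h1, h2⟩)
          · exact h
          · exact absurd (hPbx h1.symm) (by omega)
        · exact Or.inl
      by_cases hgt : x.1 > b.1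
      · rw [if_pos hgt]
        simp [PySem.List.insertBy, hiff.mpr hgt]
      · rw [if_neg hgt]
        have hnc : ¬ (pyCompare x b < 0) := fun hcon => hgt (hiff.mp hcon)
        simp [PySem.List.insertBy, hnc]

-- named pieces of the two ports (definitionally equal to the fold bodies of the ports)
def musOf (mus : List String) : List pvE :=
  (PySem.List.enumerate mus).foldl (fun acc im => acc ++ [aEntry im]) []

def ansOf (m : String) (mus : List String) : List pvE :=
  (musOf mus).foldl (fun acc mu =>
    if PySem.Chars.find mu.2.2.2 (changeShap m.toList) ≠ -1 then acc ++ [mu] else acc) []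

def bMel (mu : String) : List Char :=
  if pDur mu > 0
  then List.take (pDur mu).toNat (PySem.List.pyRepeat (flattenNotes (pNotes mu).toList) (pDur mu))
  else []

def bStep (target : List Char) (best : String × Option Int) (music : String) : String × Option Int :=
  let startS := PySem.Str.slice music (some 0) (some 5)
  let endS := PySem.Str.slice music (some 6) (some 11)
  let notesS := PySem.Str.slice music (some 12) none
  let parts := (PySem.Str.split? notesS ",").getD []
  let name := parts.getD 0 ""
  let notes0 := parts.getD 1 ""
  let start := (PySem.Int.ofStr? (PySem.Str.slice startS (some 0) (some 2))).getD 0 * 60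
               + (PySem.Int.ofStr? (PySem.Str.slice startS (some 3) none)).getD 0
  let endT := (PySem.Int.ofStr? (PySem.Str.slice endS (some 0) (some 2))).getD 0 * 60
               + (PySem.Int.ofStr? (PySem.Str.slice endS (some 3) none)).getD 0
  let dur := endT - start
  let core := flattenNotes notes0.toList
  let melody : List Char := if dur > 0 then List.take dur.toNat (PySem.List.pyRepeat core dur) else []
  if PySem.Chars.isIn target melody
      && (match best.2 with | none => true | some d => decide (dur > d))
  then (name, some dur) else best

lemma bStep_eq (target : List Char) (st : String × Option Int) (mu : String) (hm : PreM mu) :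
    bStep target st mu = stepE target st (entryOf 0 mu) := by
  have h1 : bStep target st mu =
      (if PySem.Chars.isIn target (bMel mu)
          && (match st.2 with | none => true | some d => decide (pDur mu > d))
       then (pName mu, some (pDur mu)) else st) := rfl
  have hmel : bMel mu = pMel mu := by
    unfold bMel
    by_cases hd : pDur mu > 0
    · rw [if_pos hd]
      have hnotes : (pNotes mu).toList ≠ [] := hm.2.1
      obtain ⟨c, hc, hcne⟩ : ∃ c ∈ (pNotes mu).toList, c ≠ '#' := by
        rcases hm.2.2 with h | h
        · omega
        · exact h
      have hfc : flattenNotes (pNotes mu).toList = pCore mu := flattenNotes_eq_changeShap _ hnotes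
      have hcne' : pCore mu ≠ [] := by
        rw [← hfc]
        exact flattenNotes_ne_nil _ c hc hcne
      rw [hfc, take_pyRepeat_eq_pMel (pCore mu) hcne' (pDur mu) hd]
      rfl
    · rw [if_neg hd]
      unfold pMel
      rw [PySem.List.pyRange_one_eq_nil (by omega)]
      rfl
  rw [h1, hmel, entryOf_unfold 0 mu, stepE_apply]

lemma stepE_entry (target : List Char) (st : String × Option Int) (i j : Int) (mu : String) :
    stepE target st (entryOf i mu) = stepE target st (entryOf j mu) := by
  rw [entryOf_unfold i mu, entryOf_unfold j mu, stepE_apply, stepE_apply]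

lemma foldl_enum {β : Type} (g : β → String → β) (l : List String) (init : β) :
    l.foldl g init = (PySem.List.enumerate l).foldl (fun st p => g st p.2) init := by
  conv_lhs => rw [← PySem.List.map_snd_enumerate l 0]
  rw [List.foldl_map]

lemma scanB (mus : List String) (h : ∀ mu ∈ mus, PreM mu) (target : List Char) :
    mus.foldl (bStep target) ("(None)", none)
      = ((PySem.List.enumerate mus).map (fun p => entryOf p.1 p.2)).foldl (stepE target)
          ("(None)", none) := by
  rw [foldl_enum (bStep target), List.foldl_map]
  apply PySem.List.foldl_congr_mem
  intro st p hp
  have hmu : p.2 ∈ mus := by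
    rw [← PySem.List.map_snd_enumerate mus 0]
    exact List.mem_map_of_mem hp
  rw [bStep_eq target st p.2 (h _ hmu)]
  exact stepE_entry target st 0 p.1 p.2

lemma stepE_eq_filter (target : List Char) (l : List pvE) (init : String × Option Int) :
    l.foldl (stepE target) init
      = (l.filter (fun e => PySem.Chars.isIn target e.2.2.2)).foldl step2 init := by
  have h : stepE target = fun st e =>
      if PySem.Chars.isIn target e.2.2.2 then step2 st e else st := by
    funext st e
    obtain ⟨dur, idx, name, mel⟩ := e
    rcases Bool.eq_false_or_eq_true (PySem.Chars.isIn target mel) with h1 | h1 <;>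
      simp [stepE, step2, h1]
  rw [h, PySem.List.foldl_if_eq_foldl_filter]

lemma findPred (s sub : List Char) :
    (decide (PySem.Chars.find s sub ≠ -1)) = PySem.Chars.isIn sub s := by
  rcases Bool.eq_false_or_eq_true (PySem.Chars.isIn sub s) with hb | hb <;> rw [hb]
  · have : PySem.Chars.find s sub ≠ -1 :=
      (PySem.Chars.find_ne_neg_one_iff s sub).mpr ((PySem.Chars.isIn_iff_infix sub s).mp hb)
    simp [this]
  · have hnf : ¬ sub <:+: s := (PySem.Chars.isIn_eq_false_iff sub s).mp hb
    simp [(PySem.Chars.find_eq_neg_one_iff s sub).mpr hnf]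

lemma musOf_eq (mus : List String) :
    musOf mus = (PySem.List.enumerate mus).map (fun p => entryOf p.1 p.2) := by
  unfold musOf
  rw [PySem.List.foldl_append_singleton_eq_map]
  simp only [List.nil_append]
  exact List.map_congr_left (fun p _ => aEntry_eq p)

lemma ansOf_eq (m : String) (mus : List String) :
    ansOf m mus = (musOf mus).filter
      (fun e => PySem.Chars.isIn (changeShap m.toList) e.2.2.2) := by
  unfold ansOf
  rw [PySem.List.foldl_append_ite_eq_filter]
  simp only [List.nil_append]
  exact List.filter_congr (fun e _ => findPred e.2.2.2 (changeShap m.toList))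

lemma enum_fst_le {t : List String} : ∀ (s : Int) (p : Int × String),
    p ∈ PySem.List.enumerate t s → s ≤ p.1 := by
  induction t with
  | nil => intro s p hp; simp [PySem.List.enumerate_nil] at hp
  | cons x t ih =>
    intro s p hp
    rw [PySem.List.enumerate_cons] at hp
    rcases List.mem_cons.mp hp with h | h
    · subst h; simp
    · have := ih (s + 1) p h; omega

lemma enum_pairwise (t : List String) : ∀ s : Int,
    (PySem.List.enumerate t s).Pairwise (fun p q => p.1 < q.1) := by
  induction t with
  | nil => intro s; simp [PySem.List.enumerate_nil]
  | cons x t ih =>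
    intro s
    rw [PySem.List.enumerate_cons]
    exact List.Pairwise.cons (fun q hq => by have := enum_fst_le (s + 1) q hq; omega) (ih (s + 1))

lemma pairwise_M (mus : List String) :
    ((PySem.List.enumerate mus).map (fun p => entryOf p.1 p.2)).Pairwise pvP := by
  rw [List.pairwise_map]
  apply List.Pairwise.imp ?_ (enum_pairwise mus 0)
  intro p q hlt heq
  simp only [entryOf] at heq ⊢
  by_cases h : 0 < pDur p.2
  · rw [if_pos h, if_pos (by rw [← heq]; exact h)]
    omega
  · rw [if_neg h, if_neg (by rw [← heq]; exact h)]
    omega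


-- ===== VERDICT (by name: the statement is the Claim_ definition above) =====
theorem solution_spec : Claim_equal_solution := by
  intro m mus hdom hpre
  unfold Spec_solution
  obtain ⟨hm, hall⟩ := pre_musics hpre
  have htgt : flattenNotes m.toList = changeShap m.toList := flattenNotes_eq_changeShap _ hm
  have hA : solution m mus =
      (if ansOf m mus = [] then "(None)"
       else ((sortFold (ansOf m mus)).headD (0, 0, "", [])).2.2.1) := rfl
  have hB : solution_alt m mus = (mus.foldl (bStep (flattenNotes m.toList)) ("(None)", none)).1 := rfl
  rw [hA, hB, htgt, scanB mus hall (changeShap m.toList), stepE_eq_filter, ansOf_eq, musOf_eq]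
  set l := ((PySem.List.enumerate mus).map (fun p => entryOf p.1 p.2)).filter
      (fun e => PySem.Chars.isIn (changeShap m.toList) e.2.2.2) with hl
  have hp : l.Pairwise pvP := (pairwise_M mus).sublist List.filter_sublist
  rw [scan2_eq]
  by_cases hnil : l = []
  · rw [if_pos hnil, hnil]
    rfl
  · rw [if_neg hnil]
    obtain ⟨b, hb⟩ : ∃ b, bestE l = some b := by
      cases hbe : bestE l with
      | none => exact absurd ((bestE_none_iff l).mp hbe) hnil
      | some b => exact ⟨b, rfl⟩
    have hhead := sorted_head l hp
    rw [hb] at hhead ⊢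
    cases hs : sortFold l with
    | nil => rw [hs] at hhead; simp at hhead
    | cons hd tl =>
      rw [hs] at hhead
      simp at hhead
      rw [hhead]
      rfl
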